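-- pv_equiv track=rewrite | github.com/Weikhang02/testfyp | app.py | count_word_classes
-- ===== SOURCE A (Python) =====
-- def count_word_classes(reviews, word_classes):
--     class_counts = {cls: 0 for cls in word_classes.keys()}
--     for review in reviews:
--         words = review.split()
--         for word in words:
--             for cls, keywords in word_classes.items():
--                 if word in keywords:
--                     class_counts[cls] += 1
--     top_class = max(class_counts, key=class_counts.get)
--     return top_class
-- ===== SOURCE B (Python) =====
-- def count_word_classes(reviews, word_classes):
--     # Pass 1: one frequency table of all words across all reviews.
--     freq = {}
--     for review in reviews:
--         for w in review.split():
--             freq[w] = freq.get(w, 0) + 1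
--     # Pass 2: each class's count is the sum of frequencies of its distinct
--     # keywords; keep the first class attaining the running maximum.
--     best_cls = None
--     best = -1
--     for cls, keywords in word_classes.items():
--         total = sum(freq.get(kw, 0) for kw in set(keywords))
--         if total > best:
--             best_cls, best = cls, total
--     return best_cls
-- ===== Notes on version B (the rewrite author's own statement) =====
-- stated objective: faster
-- what changed: B makes one pass building a single word->frequency dict, then scores each class as the sum of its distinct keywords' frequencies with a running argmax, instead of A's per-word scan over every class's whole keyword list followed by max().
import Mathlib
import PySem

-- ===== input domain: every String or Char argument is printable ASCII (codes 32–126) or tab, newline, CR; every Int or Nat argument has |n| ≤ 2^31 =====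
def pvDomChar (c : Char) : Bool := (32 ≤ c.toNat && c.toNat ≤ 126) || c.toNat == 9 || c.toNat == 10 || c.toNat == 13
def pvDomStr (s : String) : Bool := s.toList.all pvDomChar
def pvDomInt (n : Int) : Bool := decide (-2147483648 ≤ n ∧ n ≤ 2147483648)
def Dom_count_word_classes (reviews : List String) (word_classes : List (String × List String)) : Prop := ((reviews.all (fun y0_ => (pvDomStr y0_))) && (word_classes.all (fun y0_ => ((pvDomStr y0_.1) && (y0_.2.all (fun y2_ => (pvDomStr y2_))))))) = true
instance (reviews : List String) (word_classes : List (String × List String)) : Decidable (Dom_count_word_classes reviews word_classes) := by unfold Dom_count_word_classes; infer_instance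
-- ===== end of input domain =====

-- B replaces A's per-word scan over every class's keyword list by one global word-frequency table plus a per-class sum with a running argmax (return values proved equal on Pre_).


-- ===== PORT A =====
def count_word_classes (reviews : List String) (word_classes : List (String × List String)) : String :=
  -- class_counts = {cls: 0 for cls in word_classes.keys()}
  let class_counts : PySem.Dict String Int :=
    (word_classes.map Prod.fst).foldl (fun d cls => d.insert cls 0) PySem.Dict.empty
  -- for review in reviews: for word in review.split():
  --   for cls, keywords in word_classes.items(): if word in keywords: class_counts[cls] += 1
  let class_counts : PySem.Dict String Int :=
    reviews.foldl (fun d review =>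
      (PySem.Str.split₀ review).foldl (fun d word =>
        word_classes.foldl (fun d p =>
          if word ∈ p.2 then d.modify p.1 0 (· + 1) else d) d) d) class_counts
  -- top_class = max(class_counts, key=class_counts.get)  (raises on empty dict: excluded by Pre_)
  (PySem.List.max? class_counts.keys (fun k => class_counts.getD k 0)).getD ""

-- ===== PORT B =====
def count_word_classes_alt (reviews : List String) (word_classes : List (String × List String)) : String :=
  -- freq = {}; for review in reviews: for w in review.split(): freq[w] = freq.get(w, 0) + 1
  let freq : PySem.Dict String Int :=
    reviews.foldl (fun d review =>
      (PySem.Str.split₀ review).foldl (fun d w => d.insert w (d.getD w 0 + 1)) d)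
      PySem.Dict.empty
  -- best_cls = None; best = -1
  -- for cls, keywords in word_classes.items():
  --   total = sum(freq.get(kw, 0) for kw in set(keywords))
  --   if total > best: best_cls, best = cls, total
  let r : Option String × Int :=
    word_classes.foldl (fun st p =>
      let total := ((PySem.Set.ofList p.2).map (fun kw => freq.getD kw 0)).sum
      if st.2 < total then (some p.1, total) else st) (none, -1)
  -- return best_cls  (None on empty word_classes: excluded by Pre_)
  r.1.getD ""

-- ===== PRECONDITION & SPEC =====
-- Pre_ excludes the empty dict, on which Python's max() raises ValueError in A (B returns None, not a string),
-- and association lists with duplicate class keys, which cannot arise from the Python dict parameter (a dict collapses them).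
def Pre_count_word_classes (_reviews : List String) (word_classes : List (String × List String)) : Prop :=
  word_classes ≠ [] ∧ (word_classes.map Prod.fst).Nodup
instance (reviews : List String) (word_classes : List (String × List String)) : Decidable (Pre_count_word_classes reviews word_classes) := by unfold Pre_count_word_classes; infer_instance

def pvWitness_count_word_classes : List String × (List (String × List String)) :=
  (["good bad good"], [("pos", ["good", "nice"]), ("neg", ["bad"])])

def Spec_count_word_classes (reviews : List String) (word_classes : List (String × List String)) (out : String) : Prop := out = count_word_classes_alt reviews word_classes
instance (reviews : List String) (word_classes : List (String × List String)) (out : String) : Decidable (Spec_count_word_classes reviews word_classes out) := by unfold Spec_count_word_classes; infer_instance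

-- ===== CLAIM (what is proved, stated in full; the proofs are below) =====
def Claim_equal_count_word_classes : Prop := ∀ (reviews : List String) (word_classes : List (String × List String)), Dom_count_word_classes reviews word_classes → Pre_count_word_classes reviews word_classes → Spec_count_word_classes reviews word_classes (count_word_classes reviews word_classes)

-- ===== LEMMAS AND PROOFS =====

-- Two nested for-loops are one loop over the flattened word list.
theorem pv_foldl_foldl_flatMap {α β σ : Type} (f : σ → β → σ) (g : α → List β) (l : List α) (init : σ) :
    l.foldl (fun s a => (g a).foldl f s) init = (l.flatMap g).foldl f init := by
  induction l generalizing init with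
  | nil => rfl
  | cons x xs ih => simp [List.flatMap_cons, List.foldl_append, ih]

-- With distinct class names, the classes matching a word contribute the class name c
-- exactly once iff w is among c's keywords.
theorem pv_count_fst_filter (wc : List (String × List String)) (p : String × List String)
    (hp : p ∈ wc) (hnd : (wc.map Prod.fst).Nodup) (w : String) :
    ((wc.filter (fun q => decide (w ∈ q.2))).map Prod.fst).count p.1
      = if w ∈ p.2 then 1 else 0 := by
  induction wc with
  | nil => cases hp
  | cons q rest ih =>
    simp only [List.map_cons, List.nodup_cons] at hnd
    rcases List.mem_cons.mp hp with hq | hrest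
    · subst hq
      have hz : ((rest.filter (fun q => decide (w ∈ q.2))).map Prod.fst).count p.1 = 0 := by
        rw [List.count_eq_zero]
        intro hmem
        exact hnd.1 (by
          rcases List.mem_map.mp hmem with ⟨r, hr, hre⟩
          exact hre ▸ List.mem_map_of_mem (List.mem_of_mem_filter hr))
      by_cases hw : w ∈ p.2 <;> simp [hw, hz]
    · have hne : q.1 ≠ p.1 := by
        intro e
        exact hnd.1 (e ▸ List.mem_map_of_mem hrest)
      have := ih hrest hnd.2
      by_cases hw : w ∈ q.2 <;>
        simp [hw, hne, this]

-- One word's pass over all classes, seen through a class name c present in wc.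
theorem pv_word_step (wc : List (String × List String)) (p : String × List String)
    (hp : p ∈ wc) (hnd : (wc.map Prod.fst).Nodup) (w : String) (d : PySem.Dict String Int) :
    (wc.foldl (fun d q => if w ∈ q.2 then d.modify q.1 0 (· + 1) else d) d).getD p.1 0
      = d.getD p.1 0 + (if w ∈ p.2 then 1 else 0) := by
  rw [PySem.List.foldl_ite_eq_foldl_filter (fun q => w ∈ q.2)
    (fun d q => PySem.Dict.modify d q.1 0 (· + 1)) wc d]
  rw [show (List.foldl (fun d q => PySem.Dict.modify d q.1 0 (· + 1)) d
        (wc.filter (fun q => decide (w ∈ q.2))))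
      = ((wc.filter (fun q => decide (w ∈ q.2))).map Prod.fst).foldl
          (fun d c => PySem.Dict.modify d c 0 (· + 1)) d from by rw [List.foldl_map]]
  rw [PySem.Dict.getD_foldl_modify_add_one, pv_count_fst_filter wc p hp hnd w]
  by_cases hw : w ∈ p.2 <;> simp [hw]

-- A's counting loop over all words, seen through a class present in wc.
theorem pv_getD_words (wc : List (String × List String)) (p : String × List String)
    (hp : p ∈ wc) (hnd : (wc.map Prod.fst).Nodup) :
    ∀ (ws : List String) (d : PySem.Dict String Int),
    (ws.foldl (fun d w => wc.foldl (fun d q => if w ∈ q.2 then d.modify q.1 0 (· + 1) else d) d) d).getD p.1 0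
      = d.getD p.1 0 + (ws.countP (fun w => decide (w ∈ p.2)) : Int) := by
  intro ws
  induction ws with
  | nil => intro d; simp
  | cons w ws ih =>
    intro d
    simp only [List.foldl_cons, ih, pv_word_step wc p hp hnd w d, List.countP_cons]
    by_cases hw : w ∈ p.2
    · simp [hw]; ring
    · simp [hw]

-- The zero-initialisation gives every class count 0.
theorem pv_getD_init (ks : List String) (c : String) :
    ∀ d : PySem.Dict String Int, d.getD c 0 = 0 →
    (ks.foldl (fun d k => d.insert k 0) d).getD c 0 = 0 := by
  induction ks with
  | nil => intro d h; exact h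
  | cons k ks ih =>
    intro d h
    refine ih _ ?_
    rw [PySem.Dict.getD_insert]
    split <;> simp [h]

-- Updating a set with elements it already has changes nothing.
theorem pv_set_update_subset (xs : List String) :
    ∀ s : PySem.Set String, (∀ x ∈ xs, x ∈ s) → PySem.Set.update s xs = s := by
  induction xs with
  | nil => intro s _; rfl
  | cons x xs ih =>
    intro s h
    have : PySem.Set.add s x = s := PySem.Set.add_of_mem (h x (List.mem_cons_self))
    simp only [PySem.Set.update, List.foldl_cons, this]
    exact ih s (fun y hy => h y (List.mem_cons_of_mem _ hy))

-- One word's pass over the classes keeps the key list unchanged.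
theorem pv_keys_word_step (wc : List (String × List String)) (w : String)
    (d : PySem.Dict String Int) (hd : ∀ q ∈ wc, q.1 ∈ d.keys) :
    (wc.foldl (fun d q => if w ∈ q.2 then d.modify q.1 0 (· + 1) else d) d).keys = d.keys := by
  rw [PySem.List.foldl_ite_eq_foldl_filter (fun q => w ∈ q.2)
    (fun d q => PySem.Dict.modify d q.1 0 (· + 1)) wc d]
  rw [show (List.foldl (fun d q => PySem.Dict.modify d q.1 0 (· + 1)) d
        (wc.filter (fun q => decide (w ∈ q.2))))
      = ((wc.filter (fun q => decide (w ∈ q.2))).map Prod.fst).foldl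
          (fun d c => PySem.Dict.modify d c 0 (· + 1)) d from by rw [List.foldl_map]]
  rw [PySem.Dict.keys_foldl_modify _ 0 (fun _ _ => (· + 1))]
  exact pv_set_update_subset _ _ (fun x hx => by
    rcases List.mem_map.mp hx with ⟨q, hq, hqe⟩
    exact hqe ▸ hd q (List.mem_of_mem_filter hq))

-- A's dict keeps exactly the class names as keys, in order.
theorem pv_keys_counts (wc : List (String × List String)) (hnd : (wc.map Prod.fst).Nodup)
    (ws : List String) :
    (ws.foldl (fun d w => wc.foldl (fun d q => if w ∈ q.2 then d.modify q.1 0 (· + 1) else d) d)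
      ((wc.map Prod.fst).foldl (fun d k => d.insert k 0)
        (PySem.Dict.empty : PySem.Dict String Int))).keys
      = wc.map Prod.fst := by
  have hinit : ((wc.map Prod.fst).foldl (fun d k => d.insert k 0)
      (PySem.Dict.empty : PySem.Dict String Int)).keys = wc.map Prod.fst := by
    rw [PySem.Dict.keys_foldl_insert (f := fun _ _ => 0), PySem.Dict.keys_empty]
    rw [show PySem.Set.update ([] : PySem.Set String) (wc.map Prod.fst)
        = PySem.Set.ofList (wc.map Prod.fst) from (PySem.Set.ofList_eq_foldl _)]
    exact PySem.Set.ofList_eq_self_of_nodup _ hnd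
  have hloop : ∀ (ws : List String) (d : PySem.Dict String Int),
      d.keys = wc.map Prod.fst →
      (ws.foldl (fun d w =>
        wc.foldl (fun d q => if w ∈ q.2 then d.modify q.1 0 (· + 1) else d) d) d).keys
        = wc.map Prod.fst := by
    intro ws
    induction ws with
    | nil => intro d h; exact h
    | cons w ws ih =>
      intro d h
      refine ih _ ?_
      rw [pv_keys_word_step wc w d (fun q hq => h ▸ List.mem_map_of_mem hq)]
      exact h
  exact hloop ws _ hinit

-- Indicator sums over a duplicate-free set of keywords.
theorem pv_ind_sum_zero (S : List String) (w : String) (h : w ∉ S) :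
    (S.map (fun kw => if w = kw then (1 : Int) else 0)).sum = 0 := by
  induction S with
  | nil => rfl
  | cons s S ih =>
    have hws : ¬ (w = s) := fun e => h (e ▸ List.mem_cons_self)
    simp [hws, ih (fun hm => h (List.mem_cons_of_mem _ hm))]

theorem pv_ind_sum (S : List String) (w : String) (hnd : S.Nodup) :
    (S.map (fun kw => if w = kw then (1 : Int) else 0)).sum
      = if w ∈ S then 1 else 0 := by
  induction S with
  | nil => simp
  | cons s S ih =>
    rw [List.nodup_cons] at hnd
    by_cases hws : w = s
    · subst hws
      simp [pv_ind_sum_zero S w hnd.1]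
    · simp [hws, ih hnd.2]

-- Summing the global word counts over the distinct keywords counts the matching words.
theorem pv_sum_counts (kws : List String) (ws : List String) :
    ((PySem.Set.ofList kws).map (fun kw => (ws.count kw : Int))).sum
      = (ws.countP (fun w => decide (w ∈ kws)) : Int) := by
  induction ws with
  | nil => simp
  | cons w ws ih =>
    have hcnt : ∀ kw : String, ((w :: ws).count kw : Int)
        = (ws.count kw : Int) + (if w = kw then (1 : Int) else 0) := by
      intro kw
      by_cases h : w = kw <;> simp [h]
    rw [show ((PySem.Set.ofList kws).map (fun kw => ((w :: ws).count kw : Int)))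
        = ((PySem.Set.ofList kws).map (fun kw =>
            (ws.count kw : Int) + (if w = kw then (1 : Int) else 0)))
      from List.map_congr_left (fun kw _ => hcnt kw)]
    rw [PySem.List.sum_map_add_int, ih, pv_ind_sum _ w (PySem.Set.nodup_ofList kws),
      List.countP_cons]
    have hmem : w ∈ PySem.Set.ofList kws ↔ w ∈ kws := PySem.Set.mem_ofList kws w
    by_cases hw : w ∈ kws <;> simp [hw, hmem]

-- The running-argmax fold computes Python's max(…, key=…) (first maximal element).
def pvMsStep (f : String → Int) : Option String → String → Option String :=
  fun acc x => match acc with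
    | none => some x
    | some m => if f m < f x then some x else some m

theorem pv_max?_eq (f : String → Int) (ks : List String) :
    PySem.List.max? ks f = ks.foldl (pvMsStep f) none := by
  unfold PySem.List.max?
  refine PySem.List.foldl_congr_mem ks _ _ none (fun acc x _ => ?_)
  cases acc <;> rfl

theorem pv_sel_aux (f : String → Int) :
    ∀ (ks : List String) (m m' : String),
    ks.foldl (pvMsStep f) (some m) = some m' →
    ks.foldl (fun st c => if st.2 < f c then (some c, f c) else st) (some m, f m)
      = (some m', f m') := by
  intro ks
  induction ks with
  | nil => intro m m' h; simpa using congrArg (fun o => ((o : Option String).getD m, f ((o : Option String).getD m))) h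
  | cons c ks ih =>
    intro m m' h
    simp only [List.foldl_cons, pvMsStep] at h ⊢
    by_cases hc : f m < f c
    · simp only [if_pos hc] at h ⊢; exact ih c m' h
    · simp only [if_neg hc] at h ⊢; exact ih m m' h

theorem pv_ms_isSome (f : String → Int) :
    ∀ (ks : List String) (m : String), ∃ m',
    ks.foldl (pvMsStep f) (some m) = some m' := by
  intro ks
  induction ks with
  | nil => intro m; exact ⟨m, rfl⟩
  | cons c ks ih =>
    intro m
    simp only [List.foldl_cons, pvMsStep]
    by_cases hc : f m < f c
    · simpa [hc] using ih c
    · simpa [hc] using ih m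

theorem pv_sel_eq_max? (f : String → Int) (ks : List String) (hne : ks ≠ [])
    (hnn : ∀ c ∈ ks, 0 ≤ f c) :
    (ks.foldl (fun st c => if st.2 < f c then (some c, f c) else st)
      ((none : Option String), (-1 : Int))).1 = PySem.List.max? ks f := by
  cases ks with
  | nil => exact absurd rfl hne
  | cons k t =>
    have hk : (-1 : Int) < f k := lt_of_lt_of_le (by norm_num) (hnn k List.mem_cons_self)
    obtain ⟨m', hm'⟩ := pv_ms_isSome f t k
    simp only [List.foldl_cons, if_pos hk]
    rw [pv_sel_aux f t k m' hm', pv_max?_eq f, List.foldl_cons,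
      show pvMsStep f none k = some k from rfl, hm']

-- ===== VERDICT (by name: the statement is the Claim_ definition above) =====
theorem count_word_classes_spec : Claim_equal_count_word_classes := by
  intro reviews wc _ hpre
  obtain ⟨hne, hnd⟩ := hpre
  unfold Spec_count_word_classes count_word_classes count_word_classes_alt
  simp only []
  -- name the shared pieces
  have hflatA :
      reviews.foldl (fun d review => (PySem.Str.split₀ review).foldl
        (fun d word => wc.foldl (fun d p => if word ∈ p.2 then d.modify p.1 0 (· + 1) else d) d) d)
        ((wc.map Prod.fst).foldl (fun d cls => d.insert cls 0) (PySem.Dict.empty : PySem.Dict String Int))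
      = (reviews.flatMap PySem.Str.split₀).foldl
          (fun d word => wc.foldl (fun d p => if word ∈ p.2 then d.modify p.1 0 (· + 1) else d) d)
          ((wc.map Prod.fst).foldl (fun d cls => d.insert cls 0) (PySem.Dict.empty : PySem.Dict String Int)) :=
    pv_foldl_foldl_flatMap _ _ _ _
  have hfreq : reviews.foldl (fun d review => (PySem.Str.split₀ review).foldl
        (fun d w => d.insert w (d.getD w 0 + 1)) d) (PySem.Dict.empty : PySem.Dict String Int)
      = PySem.Dict.counter (reviews.flatMap PySem.Str.split₀) := by
    rw [pv_foldl_foldl_flatMap, PySem.Dict.foldl_insert_getD_add_one_eq_counter]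
  rw [hflatA, hfreq]
  set allW := reviews.flatMap PySem.Str.split₀ with hAW
  set init := ((wc.map Prod.fst).foldl (fun d cls => d.insert cls 0)
    (PySem.Dict.empty : PySem.Dict String Int)) with hinit
  set D := allW.foldl
      (fun d word => wc.foldl (fun d p => if word ∈ p.2 then d.modify p.1 0 (· + 1) else d) d)
      init with hD
  -- the class counts A ends with
  have hgetD : ∀ p ∈ wc, D.getD p.1 0 = (allW.countP (fun w => decide (w ∈ p.2)) : Int) := by
    intro p hp
    rw [hD, pv_getD_words wc p hp hnd allW init,
      hinit, pv_getD_init (wc.map Prod.fst) p.1 PySem.Dict.empty (PySem.Dict.getD_empty _ _),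
      zero_add]
  -- B's per-class totals are those same counts
  have hval : ∀ p ∈ wc,
      ((PySem.Set.ofList p.2).map (fun kw => (PySem.Dict.counter allW).getD kw 0)).sum
        = D.getD p.1 0 := by
    intro p hp
    rw [show ((PySem.Set.ofList p.2).map (fun kw => (PySem.Dict.counter allW).getD kw 0))
        = ((PySem.Set.ofList p.2).map (fun kw => (allW.count kw : Int)))
      from List.map_congr_left (fun kw _ => PySem.Dict.getD_counter allW kw)]
    rw [pv_sum_counts p.2 allW, hgetD p hp]
  -- B's selection fold, rewritten over the class names with A's key function
  have hsel : wc.foldl (fun st p =>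
        if st.2 < ((PySem.Set.ofList p.2).map (fun kw => (PySem.Dict.counter allW).getD kw 0)).sum
        then (some p.1, ((PySem.Set.ofList p.2).map (fun kw => (PySem.Dict.counter allW).getD kw 0)).sum)
        else st) ((none : Option String), (-1 : Int))
      = (wc.map Prod.fst).foldl (fun st c => if st.2 < D.getD c 0 then (some c, D.getD c 0) else st)
          ((none : Option String), (-1 : Int)) := by
    rw [PySem.List.foldl_congr_mem wc _
      (fun st p => if st.2 < D.getD p.1 0 then (some p.1, D.getD p.1 0) else st) _
      (fun st p hp => by rw [hval p hp]), List.foldl_map]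
  have hkeys : D.keys = wc.map Prod.fst := pv_keys_counts wc hnd allW
  have hnn : ∀ c ∈ wc.map Prod.fst, 0 ≤ D.getD c 0 := by
    intro c hc
    rcases List.mem_map.mp hc with ⟨p, hp, hpe⟩
    rw [← hpe, hgetD p hp]
    exact Int.natCast_nonneg _
  have hne' : wc.map Prod.fst ≠ [] := by simpa using hne
  rw [hsel, pv_sel_eq_max? (fun c => D.getD c 0) (wc.map Prod.fst) hne' hnn, hkeys]
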